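-- pv_equiv track=rewrite | github.com/Sisyetad/A2SV-hub | A2SV G6 - Round #7 23-Mar-2025/E - Strange Mirroring 316189.py | find_kth_character
-- ===== SOURCE A (Python) =====
-- def find_kth_character(s, k):
--     n = len(s)
--     flipped = False
--     i = 0
--
--     while (2**i) * n < k:
--         i += 1
--
--     while k > n:
--         half = (2**(i - 1)) * n
--         if k > half:
--             k -= half
--             flipped = not flipped
--         i -= 1
--
--     return s[k-1].swapcase() if flipped else s[k-1]
-- ===== SOURCE B (Python) =====
-- def find_kth_character(s, k):
--     n = len(s)
--     if k <= n:
--         return s[k - 1]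
--     block, offset = divmod(k - 1, n)
--     c = s[offset]
--     return c.swapcase() if block.bit_count() & 1 else c
-- ===== Notes on version B (the rewrite author's own statement) =====
-- stated objective: simpler
-- what changed: A's level-finding loop and half-peeling loop are replaced by a closed form: block = (k-1)//n, offset = (k-1)%n, and the case is flipped iff the popcount of block is odd.
import Mathlib
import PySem

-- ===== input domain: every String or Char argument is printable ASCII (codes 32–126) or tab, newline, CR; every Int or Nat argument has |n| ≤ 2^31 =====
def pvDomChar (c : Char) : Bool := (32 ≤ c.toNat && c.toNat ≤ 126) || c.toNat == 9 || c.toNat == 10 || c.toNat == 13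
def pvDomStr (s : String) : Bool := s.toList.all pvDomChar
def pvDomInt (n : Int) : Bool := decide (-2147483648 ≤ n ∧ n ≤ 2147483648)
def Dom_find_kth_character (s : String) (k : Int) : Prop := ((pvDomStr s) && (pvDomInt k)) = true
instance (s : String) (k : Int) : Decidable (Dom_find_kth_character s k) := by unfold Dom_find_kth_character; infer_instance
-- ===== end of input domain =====

-- B replaces A's two index-peeling loops by the closed form: block = (k-1)//n, flip = parity of
-- popcount(block); objective: simpler (no loops).

-- shared helper: Python str.swapcase on one character (exact on the ASCII domain)
def pvSwap (c : Char) : Char :=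
  if PySem.Chars.isupper c then PySem.Chars.lowerChar c
  else if PySem.Chars.islower c then PySem.Chars.upperChar c
  else c

-- ===== PORT A =====
-- first while loop of A: raise i until 2**i * n >= k.  The fuel argument only makes the
-- recursion total: within Dom (|k| ≤ 2^31) the Python loop runs at most 32 < 64 times whenever
-- it terminates at all (n ≥ 1; for n = 0 and k > 0 the Python loop never exits — outside Pre_).
def pvFindI (n k : Int) : Nat → Nat → Nat
  | 0, i => i
  | fuel + 1, i => if 2 ^ i * n < k then pvFindI n k fuel (i + 1) else i

-- second while loop of A (state k, i, flipped).  i is kept as a Nat: in Python i stays ≥ 1 at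
-- every evaluation of 2**(i-1) (the loop exits at i = 0 since then k ≤ n); fuel as above.
def pvPeel (n : Int) : Nat → Int → Nat → Bool → Int × Bool
  | 0, k, _, f => (k, f)
  | fuel + 1, k, i, f =>
    if n < k then
      let half := 2 ^ (i - 1) * n
      if half < k then pvPeel n fuel (k - half) (i - 1) (!f)
      else pvPeel n fuel k (i - 1) f
    else (k, f)

def find_kth_character (s : String) (k : Int) : String :=
  let n : Int := PySem.Str.len s
  let i := pvFindI n k 64 0
  let p := pvPeel n 64 k i false
  match PySem.List.pyGet? s.toList (p.1 - 1) with
  | some c => String.ofList [if p.2 then pvSwap c else c]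
  | none => ""          -- IndexError; excluded by Pre_

-- ===== PORT B =====
def find_kth_character_alt (s : String) (k : Int) : String :=
  let n : Int := PySem.Str.len s
  if k ≤ n then
    match PySem.List.pyGet? s.toList (k - 1) with
    | some c => String.ofList [c]
    | none => ""        -- IndexError; excluded by Pre_
  else
    match PySem.Int.divmod? (k - 1) n with
    | some (block, offset) =>
      match PySem.List.pyGet? s.toList offset with
      | some c => String.ofList [if PySem.Int.bitCount block % 2 ≠ 0 then pvSwap c else c]
      | none => ""      -- unreachable: 0 ≤ offset < n
    | none => ""        -- ZeroDivisionError (n = 0); excluded by Pre_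

-- ===== PRECONDITION & SPEC =====
-- Pre_ excludes exactly the inputs where Python A does not return: empty s (A loops forever for
-- k > 0 and hits IndexError for k ≤ 0), and k < 1 - len(s) (IndexError on s[k-1]).
def Pre_find_kth_character (s : String) (k : Int) : Prop :=
  1 ≤ (s.toList.length : Int) ∧ 1 - (s.toList.length : Int) ≤ k
instance (s : String) (k : Int) : Decidable (Pre_find_kth_character s k) := by
  unfold Pre_find_kth_character; infer_instance
def pvWitness_find_kth_character : String × Int := ("ab", 5)
def Spec_find_kth_character (s : String) (k : Int) (out : String) : Prop := out = find_kth_character_alt s k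
instance (s : String) (k : Int) (out : String) : Decidable (Spec_find_kth_character s k out) := by unfold Spec_find_kth_character; infer_instance

-- ===== CLAIM (what is proved, stated in full; the proofs are below) =====
def Claim_equal_find_kth_character : Prop := ∀ (s : String) (k : Int), Dom_find_kth_character s k → Pre_find_kth_character s k → Spec_find_kth_character s k (find_kth_character s k)

-- ===== LEMMAS AND PROOFS =====

lemma pvFindI_stop (n k : Int) (i : Nat) (h : ¬ 2 ^ i * n < k) :
    ∀ fuel, pvFindI n k fuel i = i := by
  intro fuel; cases fuel with
  | zero => rfl
  | succ fuel => simp [pvFindI, h]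

lemma pvPeel_exit (n k : Int) (h : ¬ n < k) :
    ∀ fuel i f, pvPeel n fuel k i f = (k, f) := by
  intro fuel i f; cases fuel with
  | zero => rfl
  | succ fuel => simp [pvPeel, h]

lemma pvFindI_ge (n k : Int) :
    ∀ (fuel i : Nat), k ≤ 2 ^ (i + fuel) * n → k ≤ 2 ^ (pvFindI n k fuel i) * n := by
  intro fuel
  induction fuel with
  | zero => intro i h; simpa [pvFindI] using h
  | succ fuel ih =>
      intro i h
      by_cases hlt : 2 ^ i * n < k
      · simp only [pvFindI, hlt, if_true]
        apply ih (i + 1)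
        rw [show i + 1 + fuel = i + (fuel + 1) from by omega]
        exact h
      · simp only [pvFindI, hlt, if_false]
        exact le_of_not_gt hlt

lemma pvFindI_le (n k : Int) :
    ∀ (fuel i : Nat), pvFindI n k fuel i ≤ i + fuel := by
  intro fuel
  induction fuel with
  | zero => intro i; simp [pvFindI]
  | succ fuel ih =>
      intro i
      by_cases hlt : 2 ^ i * n < k
      · simp only [pvFindI, hlt, if_true]
        have := ih (i + 1); omega
      · simp only [pvFindI, hlt, if_false]; omega

lemma pvBitCount_add_pow :
    ∀ (i : Nat) (b : Int), 0 ≤ b → b < 2 ^ i →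
      PySem.Int.bitCount (b + 2 ^ i) = PySem.Int.bitCount b + 1 := by
  intro i
  induction i with
  | zero =>
      intro b hb0 hb1
      have hb : b = 0 := by omega
      subst hb; decide
  | succ i ih =>
      intro b hb0 hb1
      have hc : (0:Int) < 2 ^ i := by positivity
      have hpow : (2:Int) ^ (i + 1) = 2 ^ i * 2 := by ring
      have hpos : 0 < b + 2 ^ (i + 1) := by omega
      rw [PySem.Int.bitCount_of_pos hpos]
      have hfd : PySem.Int.floordiv (b + 2 ^ (i + 1)) 2 = b / 2 + 2 ^ i := by
        simp only [PySem.Int.floordiv]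
        rw [Int.fdiv_eq_ediv]
        simp only [show ((0:Int) ≤ 2 ∨ (2:Int) ∣ (b + 2 ^ (i+1))) from Or.inl (by norm_num),
          if_true]
        omega
      have hmd : PySem.Int.mod (b + 2 ^ (i + 1)) 2 = b % 2 := by
        simp only [PySem.Int.mod]
        rw [Int.fmod_eq_emod]
        simp only [show ((0:Int) ≤ 2 ∨ (2:Int) ∣ (b + 2 ^ (i+1))) from Or.inl (by norm_num),
          if_true]
        omega
      rw [hfd, hmd]
      rcases eq_or_lt_of_le hb0 with hb | hb
      · -- b = 0
        rw [← hb]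
        have h0 : (0:Int) / 2 = 0 := by norm_num
        rw [h0, zero_add]
        have := ih 0 (le_refl 0) hc
        simpa [PySem.Int.bitCount_zero] using this
      · -- 0 < b
        have hdiv : b / 2 < 2 ^ i := by omega
        have hdiv0 : 0 ≤ b / 2 := by omega
        rw [ih (b / 2) hdiv0 hdiv]
        rw [PySem.Int.bitCount_of_pos hb]
        have hfd2 : PySem.Int.floordiv b 2 = b / 2 := by
          simp only [PySem.Int.floordiv]
          rw [Int.fdiv_eq_ediv]
          simp only [show ((0:Int) ≤ 2 ∨ (2:Int) ∣ b) from Or.inl (by norm_num), if_true]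
          omega
        have hmd2 : PySem.Int.mod b 2 = b % 2 := by
          simp only [PySem.Int.mod]
          rw [Int.fmod_eq_emod]
          simp only [show ((0:Int) ≤ 2 ∨ (2:Int) ∣ b) from Or.inl (by norm_num), if_true]
          omega
        rw [hfd2, hmd2]
        omega

-- the invariant of A's second loop: peeling halves computes the popcount parity of the block index
lemma pvPeel_eq (n : Int) (hn : 1 ≤ n) :
    ∀ (i fuel : Nat) (k : Int) (f : Bool), 1 ≤ k → k ≤ 2 ^ i * n → i ≤ fuel →
      pvPeel n fuel k i f =
        ((k - 1) % n + 1, xor f (decide (PySem.Int.bitCount ((k - 1) / n) % 2 ≠ 0))) := by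
  intro i
  induction i with
  | zero =>
      intro fuel k f hk1 hk2 _
      have hkn : ¬ n < k := by simpa using hk2
      rw [pvPeel_exit n k hkn]
      have hm : (k - 1) % n = k - 1 := Int.emod_eq_of_lt (by omega) (by omega)
      have hd : (k - 1) / n = 0 := Int.ediv_eq_zero_of_lt (by omega) (by omega)
      simp [hm, hd, PySem.Int.bitCount_zero]
  | succ i ih =>
      intro fuel k f hk1 hk2 hfuel
      obtain ⟨fuel', rfl⟩ : ∃ fuel', fuel = fuel' + 1 := ⟨fuel - 1, by omega⟩
      by_cases hkn : n < k
      · have hhalf : (i + 1) - 1 = i := by omega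
        have hlin : (2:Int) ^ (i + 1) * n = 2 ^ i * n + 2 ^ i * n := by ring
        simp only [pvPeel, hkn, if_true, hhalf]
        by_cases hh : 2 ^ i * n < k
        · simp only [hh, if_true]
          rw [ih fuel' (k - 2 ^ i * n) (!f) (by omega) (by omega) (by omega)]
          -- the remainder is unchanged, the quotient loses its top bit
          have e1 : k - 2 ^ i * n - 1 = (k - 1) + n * (-(2 ^ i)) := by ring
          have hmod : (k - 2 ^ i * n - 1) % n = (k - 1) % n := by
            rw [e1, Int.add_mul_emod_self_left]
          have hdiv : (k - 2 ^ i * n - 1) / n = (k - 1) / n - 2 ^ i := by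
            rw [e1, Int.add_mul_ediv_left _ _ (by omega : n ≠ 0)]; ring
          have hblo : (0:Int) ≤ (k - 1) / n - 2 ^ i := by
            have : (2:Int) ^ i ≤ (k - 1) / n :=
              (Int.le_ediv_iff_mul_le (by omega)).mpr (by omega)
            omega
          have hbhi : (k - 1) / n - 2 ^ i < 2 ^ i := by
            have : (k - 1) / n < 2 ^ (i + 1) :=
              (Int.ediv_lt_iff_lt_mul (by omega)).mpr (by omega)
            omega
          have hbit : PySem.Int.bitCount ((k - 1) / n)
              = PySem.Int.bitCount ((k - 1) / n - 2 ^ i) + 1 := by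
            have := pvBitCount_add_pow i ((k - 1) / n - 2 ^ i) hblo hbhi
            rw [← this]; congr 1; ring
          rw [hmod, hdiv, hbit]
          congr 1
          by_cases hp : PySem.Int.bitCount ((k - 1) / n - 2 ^ i) % 2 ≠ 0
          · have hp' : ¬ (PySem.Int.bitCount ((k - 1) / n - 2 ^ i) + 1) % 2 ≠ 0 := by omega
            simp [hp, hp']
          · have hp' : (PySem.Int.bitCount ((k - 1) / n - 2 ^ i) + 1) % 2 ≠ 0 := by omega
            simp [hp, hp']
        · simp only [hh, if_false]
          exact ih fuel' k f hk1 (by omega) (by omega)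
      · rw [pvPeel_exit n k hkn]
        have hm : (k - 1) % n = k - 1 := Int.emod_eq_of_lt (by omega) (by omega)
        have hd : (k - 1) / n = 0 := Int.ediv_eq_zero_of_lt (by omega) (by omega)
        simp [hm, hd, PySem.Int.bitCount_zero]

-- ===== VERDICT (by name: the statement is the Claim_ definition above) =====
theorem find_kth_character_spec : Claim_equal_find_kth_character := by
  intro s k hDom hPre
  unfold Spec_find_kth_character
  unfold Pre_find_kth_character at hPre
  have hk31 : k ≤ 2147483648 := by
    simp only [Dom_find_kth_character, pvDomInt, Bool.and_eq_true, decide_eq_true_eq] at hDom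
    exact hDom.2.2
  simp only [find_kth_character, find_kth_character_alt]
  set n : Int := PySem.Str.len s with hn_def
  have hnl : n = (s.toList.length : Int) := PySem.Str.len_eq s
  have hn : 1 ≤ n := by rw [hnl]; exact hPre.1
  by_cases hkn : k ≤ n
  · -- first block: i = 0, the peel loop never runs, no flip
    have hstop : ¬ 2 ^ 0 * n < k := by simpa using hkn
    rw [pvFindI_stop n k 0 hstop 64]
    rw [pvPeel_exit n k (by omega) 64 0 false]
    rw [if_pos hkn]
    cases hg : PySem.List.pyGet? s.toList (k - 1) <;> simp
  · -- k > n: popcount-parity closed form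
    have hk1 : 1 ≤ k := by omega
    have h64 : k ≤ 2 ^ (0 + 64) * n := by
      have h1 : (2147483648:Int) < 2 ^ (0 + 64) := by norm_num
      have h2 : (2:Int) ^ (0 + 64) ≤ 2 ^ (0 + 64) * n :=
        le_mul_of_one_le_right (by positivity) hn
      omega
    have hki : k ≤ 2 ^ (pvFindI n k 64 0) * n := pvFindI_ge n k 64 0 h64
    have hile : pvFindI n k 64 0 ≤ 64 := by have := pvFindI_le n k 64 0; omega
    rw [pvPeel_eq n hn (pvFindI n k 64 0) 64 k false hk1 hki hile]
    rw [if_neg hkn]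
    have hdm : PySem.Int.divmod? (k - 1) n = some ((k - 1) / n, (k - 1) % n) := by
      simp only [PySem.Int.divmod?]
      rw [if_neg (by omega : ¬ n = 0)]
      rw [Int.fdiv_eq_ediv, Int.fmod_eq_emod]
      simp only [show ((0:Int) ≤ n ∨ n ∣ (k - 1)) from Or.inl (by omega), if_true]
      simp
    rw [hdm]
    have hidx : (k - 1) % n + 1 - 1 = (k - 1) % n := by ring
    simp only [hidx, Bool.false_xor]
    cases hg : PySem.List.pyGet? s.toList ((k - 1) % n) with
    | none => simp
    | some c =>
        by_cases hp : PySem.Int.bitCount ((k - 1) / n) % 2 ≠ 0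
        · simp [hp]
        · simp [hp]
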